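-- pv_equiv track=rewrite | github.com/devbali/tpautocorrect | autocorrect.py | possible_strs
-- ===== SOURCE A (Python) =====
-- allalph = list("aeiounwtpsjklm")
--
-- vowels = list("aeiou")
--
-- consonants = list("wtpsjklm")
--
-- horizontals = {
-- 	"q":["w"],
-- 	"w":["e"],
-- 	"e":["w"],
-- 	"r":["e","t"],
-- 	"t":[],
-- 	"y":["u","t"],
-- 	"u":["i"],
-- 	"i":["u","o"],
-- 	"o":["p","i"],
-- 	"p":["o"],
-- 	"a":["s"],
-- 	"s":["a"],
-- 	"d":["s"],
-- 	"f":[],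
-- 	"g":[],
-- 	"h":["j"],
-- 	"j":["k"],
-- 	"k":["l","j"],
-- 	"l":["k"],
-- 	"z":[],
-- 	"x":[],
-- 	"c":[],
-- 	"v":[],
-- 	"b":["n"],
-- 	"n":["m"],
-- 	"m":["n"]
-- 	}
--
-- def possible_strs (string,prev="n"):
-- 	if string == "": return [""] # Base case for recursion
-- 	if len(string) > 7: string = string[:7] # Dont want to end up with massive arrays
--
-- 	letters = [] # What the first letter could mean
-- 	hor = horizontals[string[0]]
--
-- 	# Letters likelihood is the letter entered, horizontals, or nothing
-- 	if string[0] in allalph: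
-- 		letters.append(string[0])
-- 	for i in hor:
-- 		if i in vowels and prev not in vowels or prev not in consonants and i not in vowels:
-- 			letters.append(i)
-- 	letters.append("") # current letter might be a mistake
--
-- 	strings = []
-- 	for letter in letters:
-- 		for s in possible_strs(string[1:],prev=letter):
-- 			strings.append(letter+s)
-- 	return strings
-- ===== SOURCE B (Python) =====
-- allalph = list("aeiounwtpsjklm")
-- vowels = list("aeiou")
-- consonants = list("wtpsjklm")
-- horizontals = {
-- 	"q":["w"], "w":["e"], "e":["w"], "r":["e","t"], "t":[], "y":["u","t"],
-- 	"u":["i"], "i":["u","o"], "o":["p","i"], "p":["o"], "a":["s"], "s":["a"],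
-- 	"d":["s"], "f":[], "g":[], "h":["j"], "j":["k"], "k":["l","j"], "l":["k"],
-- 	"z":[], "x":[], "c":[], "v":[], "b":["n"], "n":["m"], "m":["n"]
-- 	}
--
-- def _letters_for(c, prev):
-- 	# possible readings of key c given the previous letter: c itself (if meaningful),
-- 	# admissible horizontal neighbours, or a slip ("")
-- 	return ([c] if c in allalph else []) \
-- 		+ [i for i in horizontals[c]
-- 			if i in vowels and prev not in vowels or prev not in consonants and i not in vowels] \
-- 		+ [""]
--
-- def possible_strs(string, prev="n"):
-- 	# iterative left-to-right expansion of (prefix, previous-letter) states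
-- 	states = [("", prev)]
-- 	for c in string[:7]:
-- 		states = [(prefix + l, l) for (prefix, p) in states for l in _letters_for(c, p)]
-- 	return [prefix for (prefix, _) in states]
-- ===== Notes on version B (the rewrite author's own statement) =====
-- stated objective: alternative
-- what changed: Replaces A's branching recursion (recurse on the tail for each candidate first letter) with a single iterative left-to-right expansion of a worklist of (prefix, previous-letter) states, the letter filter factored into a helper.
import Mathlib
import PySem

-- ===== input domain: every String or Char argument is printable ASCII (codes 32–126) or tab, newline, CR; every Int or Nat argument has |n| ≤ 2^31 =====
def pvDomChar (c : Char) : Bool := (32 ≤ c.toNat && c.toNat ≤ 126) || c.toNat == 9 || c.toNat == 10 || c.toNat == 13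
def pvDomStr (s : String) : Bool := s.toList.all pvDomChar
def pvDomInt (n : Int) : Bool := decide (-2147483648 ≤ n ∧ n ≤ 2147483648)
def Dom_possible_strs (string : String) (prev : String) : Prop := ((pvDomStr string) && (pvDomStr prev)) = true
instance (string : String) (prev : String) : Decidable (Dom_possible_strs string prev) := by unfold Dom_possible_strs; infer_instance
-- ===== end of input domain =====

-- B replaces A's branching recursion by one iterative left-to-right expansion of
-- (prefix, previous-letter) states (objective: alternative decomposition, same cost).

-- ===== PORT A =====
def allalphL : List String := ["a","e","i","o","u","n","w","t","p","s","j","k","l","m"]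
def vowelsL : List String := ["a","e","i","o","u"]
def consonantsL : List String := ["w","t","p","s","j","k","l","m"]
def horizontalsD : PySem.Dict String (List String) := PySem.Dict.ofList
  [("q",["w"]), ("w",["e"]), ("e",["w"]), ("r",["e","t"]), ("t",[]), ("y",["u","t"]),
   ("u",["i"]), ("i",["u","o"]), ("o",["p","i"]), ("p",["o"]), ("a",["s"]), ("s",["a"]),
   ("d",["s"]), ("f",[]), ("g",[]), ("h",["j"]), ("j",["k"]), ("k",["l","j"]), ("l",["k"]),
   ("z",[]), ("x",[]), ("c",[]), ("v",[]), ("b",["n"]), ("n",["m"]), ("m",["n"])]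

-- A's 'letters' block for first letter c: append c if alphabet member, then the
-- admissible horizontals (append loop), then "".  (horizontals[c] via get?.getD []:
-- the KeyError case is excluded by Pre_possible_strs.)
def lettersA (c : Char) (prev : String) : List String :=
  let c0 : String := String.mk [c]
  let hor := (horizontalsD.get? c0).getD []
  let letters : List String := if allalphL.contains c0 then [c0] else []
  let letters := hor.foldl (fun acc i =>
    if (vowelsL.contains i && !vowelsL.contains prev)
        || (!consonantsL.contains prev && !vowelsL.contains i)
    then acc ++ [i] else acc) letters
  letters ++ [""]

-- A's recursion on the character list; the `string = string[:7]` truncation becomes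
-- keeping the head and taking 6 of the rest.
def possible_strs_go : List Char → String → List String
  | [], _ => [""]
  | c :: rest, prev =>
    (lettersA c prev).foldl
      (fun acc letter =>
        acc ++ (possible_strs_go (if rest.length > 6 then rest.take 6 else rest) letter).map
          (fun s => letter ++ s)) []
termination_by cs => cs.length
decreasing_by
  split <;> simp [List.length_take]

def possible_strs (string : String) (prev : String) : List String :=
  possible_strs_go string.toList prev

-- ===== PORT B =====
def letters_for (c : String) (prev : String) : List String :=
  (if allalphL.contains c then [c] else []) ++
  ((horizontalsD.get? c).getD []).filter (fun i =>
    (vowelsL.contains i && !vowelsL.contains prev)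
      || (!consonantsL.contains prev && !vowelsL.contains i)) ++ [""]

def possible_strs_alt (string : String) (prev : String) : List String :=
  let states : List (String × String) :=
    (string.toList.take 7).foldl
      (fun states c =>
        states.flatMap (fun st =>
          (letters_for (String.mk [c]) st.2).map (fun l => (st.1 ++ l, l))))
      [("", prev)]
  states.map (fun st => st.1)

-- ===== PRECONDITION & SPEC =====
-- Pre_ excludes exactly the inputs where A raises KeyError: some of the first 7
-- characters is not a lowercase ASCII letter (not a key of `horizontals`).
def Pre_possible_strs (string : String) (prev : String) : Prop :=
  ((string.toList.take 7).all (fun c => 'a' ≤ c && c ≤ 'z')) = true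
instance (string : String) (prev : String) : Decidable (Pre_possible_strs string prev) := by
  unfold Pre_possible_strs; infer_instance
def pvWitness_possible_strs : String × String := ("wts", "n")

def Spec_possible_strs (string : String) (prev : String) (out : List String) : Prop := out = possible_strs_alt string prev
instance (string : String) (prev : String) (out : List String) : Decidable (Spec_possible_strs string prev out) := by unfold Spec_possible_strs; infer_instance

-- ===== CLAIM (what is proved, stated in full; the proofs are below) =====
def Claim_equal_possible_strs : Prop := ∀ (string : String) (prev : String), Dom_possible_strs string prev → Pre_possible_strs string prev → Spec_possible_strs string prev (possible_strs string prev)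

-- ===== LEMMAS AND PROOFS =====

-- proof-only reference recursion: A's recursion with the truncation stripped
def gPure : List Char → String → List String
  | [], _ => [""]
  | c :: rest, prev =>
    (lettersA c prev).flatMap (fun l => (gPure rest l).map (fun s => l ++ s))

lemma lettersA_eq (c : Char) (prev : String) :
    lettersA c prev = letters_for (String.mk [c]) prev := by
  simp only [lettersA, letters_for, PySem.List.foldl_append_ite_eq_filter]
  simp [List.append_assoc]

lemma go_eq_gPure (cs : List Char) : ∀ prev, cs.length ≤ 7 →
    possible_strs_go cs prev = gPure cs prev := by
  induction cs with
  | nil => intro prev _; simp [possible_strs_go, gPure]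
  | cons c rest ih =>
    intro prev h
    have h6 : ¬ rest.length > 6 := by simp at h; omega
    have ih' : ∀ p, possible_strs_go rest p = gPure rest p :=
      fun p => ih p (by simp at h; omega)
    simp only [possible_strs_go, gPure, if_neg h6, ih',
      PySem.List.foldl_append_eq_flatMap, List.nil_append]

lemma go_eq_gPure_take (cs : List Char) (prev : String) :
    possible_strs_go cs prev = gPure (cs.take 7) prev := by
  cases cs with
  | nil => simp [possible_strs_go, gPure]
  | cons c rest =>
    by_cases h6 : rest.length > 6
    · have : ∀ p, possible_strs_go (rest.take 6) p = gPure (rest.take 6) p :=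
        fun p => go_eq_gPure _ p (by simp [List.length_take])
      simp only [possible_strs_go, if_pos h6, this,
        PySem.List.foldl_append_eq_flatMap, List.nil_append]
      have hg : gPure (c :: List.take 6 rest) prev
          = (lettersA c prev).flatMap
              (fun l => (gPure (List.take 6 rest) l).map (fun s => l ++ s)) := rfl
      rw [show List.take 7 (c :: rest) = c :: List.take 6 rest from rfl, hg]
    · have ht : rest.take 6 = rest := List.take_of_length_le (by omega)
      have : ∀ p, possible_strs_go rest p = gPure rest p :=
        fun p => go_eq_gPure _ p (by omega)
      simp only [possible_strs_go, gPure, if_neg h6, this,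
        PySem.List.foldl_append_eq_flatMap, List.nil_append, List.take_succ_cons, ht]

lemma foldl_states (cs : List Char) :
    ∀ states : List (String × String),
      (cs.foldl
        (fun states c =>
          states.flatMap (fun st =>
            (letters_for (String.mk [c]) st.2).map (fun l => (st.1 ++ l, l))))
        states).map (fun st => st.1)
      = states.flatMap (fun st => (gPure cs st.2).map (fun s => st.1 ++ s)) := by
  induction cs with
  | nil =>
    intro states
    simp [gPure]
    induction states with
    | nil => rfl
    | cons st rest ih => simp [ih]
  | cons c rest ih =>
    intro states
    simp only [List.foldl_cons, ih, gPure, lettersA_eq]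
    simp [List.flatMap_assoc, List.map_flatMap, List.flatMap_map, Function.comp_def,
      String.append_assoc]

-- ===== VERDICT (by name: the statement is the Claim_ definition above) =====
theorem possible_strs_spec : Claim_equal_possible_strs := by
  intro string prev _ _
  unfold Spec_possible_strs possible_strs possible_strs_alt
  rw [go_eq_gPure_take, foldl_states]
  simp
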